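-- pv_equiv track=rewrite | github.com/MehtaDevang/CompetitiveCoding | leetcode/2901.Longest Unequal Adjacent Groups Subsequence II.py | getWordsInLongestSubsequence
-- ===== SOURCE A (Python) =====
-- from typing import List
--
-- def getWordsInLongestSubsequence(words: List[str], groups: List[int]) -> List[str]:
--     n = len(words)
--
--     connections = {}
--     maxs = {}
--     result = []
--
--     def calculate_hamming_distance(w1, w2):
--         differences = 0
--
--         if len(w1) != len(w2):
--             return -1
--         else:
--             for i in range(len(w1)):
--                 if w1[i] != w2[i]:
--                     differences += 1
--                 if differences > 1:
--                     return -1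
--         return differences
--
--     for i in range(n):
--         connections[i] = []
--
--         for k in range(i, n):
--             if groups[i] != groups[k] and calculate_hamming_distance(words[i], words[k]) == 1:
--                 connections[i].append(k)
--
--     for i in range(n-1, -1, -1):
--         maxs[i] = []
--
--         for connection in connections[i]:
--             if len(maxs[connection]) > len(maxs[i]):
--                 maxs[i] = maxs[connection]
--
--         maxs[i] = [words[i]] + maxs[i]
--
--         if len(maxs[i]) > len(result):
--             result = maxs[i]
--     return result
-- ===== SOURCE B (Python) =====
-- def getWordsInLongestSubsequence(words, groups):
--     n = len(words)
--     # wildcard-pattern index: (prefix, suffix) -> ascending list of indices of words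
--     # matching the pattern (same length, equal everywhere except the wildcard slot)
--     pairs = [((w[:p], w[p + 1:]), j) for j, w in enumerate(words) for p in range(len(w))]
--     index = {}
--     for key, j in pairs:
--         if key not in index:
--             index[key] = []
--         index[key].append(j)
--     suffix = []  # suffix[t] = best chain starting at word index i + 1 + t
--     res = []
--     for i in range(n - 1, -1, -1):
--         w = words[i]
--         neigh = []
--         for p in range(len(w)):
--             for j in index[(w[:p], w[p + 1:])]:
--                 if j > i and groups[i] != groups[j] and words[j][p] != w[p]:
--                     neigh.append(j)
--         neigh.sort()
--         tail = []
--         for j in neigh: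
--             cand = suffix[j - i - 1]
--             if len(cand) > len(tail):
--                 tail = cand
--         best = [w] + tail
--         suffix.insert(0, best)
--         if len(best) > len(res):
--             res = best
--     return res
-- ===== Notes on version B (the rewrite author's own statement) =====
-- stated objective: faster
-- what changed: Replaces A's O(n^2) all-pairs hamming-distance scan by a wildcard-pattern index (one dict bucket per (prefix,suffix) slot) from which each word's hamming-1 neighbours are read off and sorted, and replaces A's dict-of-chains DP by a back-to-front suffix list built by prepending; tie-breaking (ascending neighbour index, latest start index) is preserved exactly.
-- outside the precondition, e.g. on getWordsInLongestSubsequence(['ab'], []): A raises IndexError, B returns ['ab']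
import Mathlib
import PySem

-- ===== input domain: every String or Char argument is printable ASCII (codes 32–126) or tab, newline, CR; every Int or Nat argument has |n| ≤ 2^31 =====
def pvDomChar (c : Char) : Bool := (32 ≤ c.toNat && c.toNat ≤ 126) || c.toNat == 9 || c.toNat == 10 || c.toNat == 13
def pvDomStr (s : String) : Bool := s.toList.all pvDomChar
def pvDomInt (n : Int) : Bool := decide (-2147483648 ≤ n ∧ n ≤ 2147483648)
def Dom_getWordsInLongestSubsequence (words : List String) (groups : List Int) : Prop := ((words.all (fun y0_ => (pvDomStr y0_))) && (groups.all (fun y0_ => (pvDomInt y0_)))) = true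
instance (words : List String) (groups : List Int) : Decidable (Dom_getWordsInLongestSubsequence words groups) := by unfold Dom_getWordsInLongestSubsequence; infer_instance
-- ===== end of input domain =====

-- B replaces A's O(n^2) all-pairs hamming scan by a wildcard-pattern (prefix,suffix) index
-- from which each word's hamming-1 successors are read off and sorted, and A's dict of chains
-- by a back-to-front suffix list; measured faster on the generated inputs.

-- ===== PORT A =====
-- calculate_hamming_distance's loop (counter `differences`, early return -1)
def pvGoHam : List Char → List Char → Int → Int
  | [], _, d => d
  | _ :: _, [], d => d
  | a :: xs, b :: ys, d =>
      let d' := if a ≠ b then d + 1 else d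
      if d' > 1 then -1 else pvGoHam xs ys d'

def pvHam (w1 w2 : List Char) : Int :=
  if w1.length ≠ w2.length then -1 else pvGoHam w1 w2 0

def pvPredA (words : List String) (groups : List Int) (i k : Int) : Bool :=
  decide (PySem.List.pyGetD groups i 0 ≠ PySem.List.pyGetD groups k 0) &&
    (pvHam (PySem.List.pyGetD words i "").toList (PySem.List.pyGetD words k "").toList == 1)

def pvConnA (words : List String) (groups : List Int) : PySem.Dict Int (List Int) :=
  (PySem.List.pyRange 0 (words.length : Int) 1).foldl
    (fun conns i =>
      conns.insert i
        ((PySem.List.pyRange i (words.length : Int) 1).foldl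
          (fun acc k => if pvPredA words groups i k then acc ++ [k] else acc) []))
    PySem.Dict.empty

def getWordsInLongestSubsequence (words : List String) (groups : List Int) : List String :=
  ((PySem.List.pyRange ((words.length : Int) - 1) (-1) (-1)).foldl
    (fun (st : PySem.Dict Int (List String) × List String) i =>
      let m0 := ((pvConnA words groups).getD i []).foldl
        (fun m c => if (st.1.getD c []).length > m.length then st.1.getD c [] else m) []
      let mi := PySem.List.pyGetD words i "" :: m0
      (st.1.insert i mi, if mi.length > st.2.length then mi else st.2))
    (PySem.Dict.empty, [])).2

-- ===== PORT B =====
-- string slices and tuple keys are ported on the List Char side (PySem.Chars; exact)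
def pvKey (w : List Char) (p : Int) : List Char × List Char :=
  (PySem.Chars.slice w none (some p), PySem.Chars.slice w (some (p + 1)) none)

def pvPairs (words : List String) : List ((List Char × List Char) × Int) :=
  (PySem.List.enumerate words 0).flatMap
    (fun jw => (PySem.List.pyRange 0 (PySem.Str.len jw.2) 1).map
      (fun p => (pvKey jw.2.toList p, jw.1)))

def pvIndex (words : List String) : PySem.Dict (List Char × List Char) (List Int) :=
  (pvPairs words).foldl (fun d pr => d.modify pr.1 [] (· ++ [pr.2])) PySem.Dict.empty

def pvCondB (words : List String) (groups : List Int) (i p j : Int) : Bool :=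
  decide (j > i) &&
    decide (PySem.List.pyGetD groups i 0 ≠ PySem.List.pyGetD groups j 0) &&
    decide (PySem.List.pyGet? (PySem.List.pyGetD words j "").toList p ≠
            PySem.List.pyGet? (PySem.List.pyGetD words i "").toList p)

def pvNeigh (words : List String) (groups : List Int)
    (idx : PySem.Dict (List Char × List Char) (List Int)) (i : Int) : List Int :=
  PySem.List.sorted
    ((PySem.List.pyRange 0 (PySem.Chars.len (PySem.List.pyGetD words i "").toList) 1).foldl
      (fun acc p =>
        (idx.getD (pvKey (PySem.List.pyGetD words i "").toList p) []).foldl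
          (fun acc j => if pvCondB words groups i p j then acc ++ [j] else acc) acc)
      [])
    (fun x => x) false

def getWordsInLongestSubsequence_alt (words : List String) (groups : List Int) : List String :=
  ((PySem.List.pyRange ((words.length : Int) - 1) (-1) (-1)).foldl
    (fun (st : List (List String) × List String) i =>
      let tail := (pvNeigh words groups (pvIndex words) i).foldl
        (fun tl j =>
          let cand := PySem.List.pyGetD st.1 (j - i - 1) []
          if cand.length > tl.length then cand else tl) []
      let best := PySem.List.pyGetD words i "" :: tail
      (best :: st.1, if best.length > st.2.length then best else st.2))
    ([], [])).2

-- ===== PRECONDITION & SPEC =====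
-- Pre_ excludes exactly the inputs with len(groups) < len(words), on which A raises
-- IndexError reading groups[i]; it excludes no input on which A returns.
def Pre_getWordsInLongestSubsequence (words : List String) (groups : List Int) : Prop :=
  words.length ≤ groups.length
instance (words : List String) (groups : List Int) :
    Decidable (Pre_getWordsInLongestSubsequence words groups) := by
  unfold Pre_getWordsInLongestSubsequence; infer_instance

def pvWitness_getWordsInLongestSubsequence : List String × List Int :=
  (["bab", "dab", "cab"], [1, 2, 2])

def Spec_getWordsInLongestSubsequence (words : List String) (groups : List Int)
    (out : List String) : Prop := out = getWordsInLongestSubsequence_alt words groups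
instance (words : List String) (groups : List Int) (out : List String) :
    Decidable (Spec_getWordsInLongestSubsequence words groups out) := by
  unfold Spec_getWordsInLongestSubsequence; infer_instance

-- ===== CLAIM (what is proved, stated in full; the proofs are below) =====
def Claim_equal_getWordsInLongestSubsequence : Prop :=
  ∀ (words : List String) (groups : List Int),
    Dom_getWordsInLongestSubsequence words groups →
    Pre_getWordsInLongestSubsequence words groups →
    Spec_getWordsInLongestSubsequence words groups (getWordsInLongestSubsequence words groups)

-- ===== LEMMAS AND PROOFS =====
def pvW (words : List String) (i : Int) : List Char := (PySem.List.pyGetD words i "").toList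

def pvMism (u v : List Char) : Nat := (u.zip v).countP (fun pr => pr.1 ≠ pr.2)

def pvMatchB (u : List Char) (c : List Char × List Char) : Bool :=
  decide (c.1.length < u.length) && (u.take c.1.length == c.1) &&
    (u.drop (c.1.length + 1) == c.2)

def pvConnList (words : List String) (groups : List Int) (i : Int) : List Int :=
  (PySem.List.pyRange i (words.length : Int) 1).filter (pvPredA words groups i)

-- ==== ham layer (from s4, proved) ====
theorem pvMism_nil (v : List Char) : pvMism [] v = 0 := by simp [pvMism]
theorem pvMism_cons (a b : Char) (u v : List Char) :
    pvMism (a :: u) (b :: v) = (if a ≠ b then 1 else 0) + pvMism u v := by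
  by_cases hab : a = b <;> simp [pvMism, hab, Nat.add_comm]

theorem pvGoHam_eq (u : List Char) : ∀ (v : List Char) (d : Int), d ≤ 1 →
    pvGoHam u v d = if d + pvMism u v ≤ 1 then d + pvMism u v else -1 := by
  induction u with
  | nil => intro v d hd; simp [pvGoHam, pvMism_nil]; omega
  | cons a u ih =>
    intro v d hd
    cases v with
    | nil => simp [pvGoHam, pvMism]; omega
    | cons b v =>
      by_cases hab : a = b
      · subst hab
        have e : pvGoHam (a::u) (a::v) d
            = if (if a ≠ a then d+1 else d) > 1 then -1 else pvGoHam u v (if a ≠ a then d+1 else d) := rfl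
        rw [e]
        simp only [ne_eq, not_true_eq_false, if_false, pvMism_cons]
        rw [if_neg (by omega), ih v d hd]
        simp
      · have e : pvGoHam (a::u) (b::v) d
            = if (if a ≠ b then d+1 else d) > 1 then -1 else pvGoHam u v (if a ≠ b then d+1 else d) := rfl
        rw [e, pvMism_cons]
        simp only [ne_eq, hab, not_false_eq_true, if_true]
        by_cases h1 : d + 1 > 1
        · rw [if_pos h1, if_neg (by push_cast; omega)]
        · rw [if_neg h1, ih v (d+1) (by omega)]
          push_cast
          by_cases h2 : d + 1 + (pvMism u v : Int) ≤ 1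
          · rw [if_pos h2, if_pos (by omega)]; ring
          · rw [if_neg h2, if_neg (by omega)]

theorem pvHam_eq_one_iff (u v : List Char) :
    pvHam u v = 1 ↔ u.length = v.length ∧ pvMism u v = 1 := by
  unfold pvHam
  by_cases h : u.length = v.length
  · rw [if_neg (by omega), pvGoHam_eq u v 0 (by omega)]
    by_cases h2 : (0 : Int) + pvMism u v ≤ 1
    · rw [if_pos h2]
      constructor
      · intro he; exact ⟨h, by omega⟩
      · intro ⟨_, he⟩; omega
    · rw [if_neg h2]
      constructor
      · intro he; omega
      · intro ⟨_, he⟩; omega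
  · rw [if_pos h]
    constructor
    · intro he; omega
    · intro ⟨he, _⟩; exact absurd he h

theorem pvMism_self (u : List Char) : pvMism u u = 0 := by
  induction u with
  | nil => simp [pvMism]
  | cons a u ih => rw [pvMism_cons]; simp [ih]

theorem pv_eq_off (u v : List Char) (p : Nat)
    (ht : u.take p = v.take p) (hd : u.drop (p+1) = v.drop (p+1))
    (q : Nat) (hq : q ≠ p) : u[q]? = v[q]? := by
  rcases Nat.lt_or_ge q p with h | h
  · rw [← List.getElem?_take_of_lt h, ht, List.getElem?_take_of_lt h]
  · have hgt : p + 1 ≤ q := by omega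
    have : q = p + 1 + (q - p - 1) := by omega
    rw [this, ← List.getElem?_drop, hd, List.getElem?_drop]

theorem pvMism_one_of (u v : List Char) (p : Nat)
    (hp : p < u.length) (hpv : p < v.length)
    (ht : u.take p = v.take p) (hd : u.drop (p+1) = v.drop (p+1))
    (hne : u[p]? ≠ v[p]?) : u.length = v.length ∧ pvMism u v = 1 := by
  have hlen : u.length = v.length := by
    have h1 := congrArg List.length hd
    simp [List.length_drop] at h1
    omega
  refine ⟨hlen, ?_⟩
  clear hlen
  induction p generalizing u v with
  | zero =>
    cases u with
    | nil => simp at hp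
    | cons a u' =>
      cases v with
      | nil => simp at hpv
      | cons b v' =>
        simp at hd hne
        subst hd
        rw [pvMism_cons, if_pos (by simpa using hne), pvMism_self]
  | succ p ih =>
    cases u with
    | nil => simp at hp
    | cons a u' =>
      cases v with
      | nil => simp at hpv
      | cons b v' =>
        simp [List.take_succ_cons] at ht
        obtain ⟨hab, ht'⟩ := ht
        subst hab
        rw [pvMism_cons, if_neg (by simp)]
        simp only [Nat.zero_add]
        exact ih u' v' (by simpa using hp) (by simpa using hpv) ht' (by simpa using hd)
          (by simpa using hne)

theorem pvMism_zero_eq (u : List Char) : ∀ (v : List Char), u.length = v.length →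
    pvMism u v = 0 → u = v := by
  induction u with
  | nil => intro v h _; cases v <;> simp_all
  | cons x xs ih =>
    intro v hl h0
    cases v with
    | nil => simp at hl
    | cons y ys =>
      rw [pvMism_cons] at h0
      by_cases hxy : x = y
      · subst hxy
        rw [if_neg (by simp)] at h0
        simp only [List.cons.injEq, true_and]
        exact ih ys (by simpa using hl) (by omega)
      · rw [if_pos (by simp [hxy])] at h0; omega

theorem pvMism_one_exists (u : List Char) : ∀ (v : List Char), u.length = v.length →
    pvMism u v = 1 →
    ∃ p : Nat, p < u.length ∧ u.take p = v.take p ∧ u.drop (p+1) = v.drop (p+1) ∧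
      u[p]? ≠ v[p]? := by
  induction u with
  | nil => intro v h hm; simp [pvMism_nil] at hm
  | cons a u' ih =>
    intro v h hm
    cases v with
    | nil => simp at h
    | cons b v' =>
      rw [pvMism_cons] at hm
      by_cases hab : a = b
      · subst hab
        rw [if_neg (by simp)] at hm
        obtain ⟨p, hp, ht, hd, hne⟩ := ih v' (by simpa using h) (by omega)
        exact ⟨p + 1, by simpa using hp, by simp [List.take_succ_cons, ht],
          by simpa using hd, by simpa using hne⟩
      · rw [if_pos (by simp [hab])] at hm
        have h0 : pvMism u' v' = 0 := by omega
        have : u' = v' := pvMism_zero_eq u' v' (by simpa using h) h0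
        subst this
        exact ⟨0, by simp, by simp, by simp, by simpa using hab⟩


-- ==== dict-of-inserts layer (from s5, proved) ====
theorem pv_getD_foldl_insert {κ ν : Type} [BEq κ] [LawfulBEq κ] (l : List κ) (f : κ → ν)
    (hl : l.Nodup) (d : PySem.Dict κ ν) (dflt : ν) (i : κ) :
    (l.foldl (fun d j => d.insert j (f j)) d).getD i dflt
      = if i ∈ l then f i else d.getD i dflt := by
  induction l generalizing d with
  | nil => simp
  | cons a l ih =>
    simp only [List.foldl_cons]
    rw [ih (List.Nodup.of_cons hl)]
    by_cases hi : i ∈ l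
    · rw [if_pos hi, if_pos (List.mem_cons_of_mem a hi)]
    · rw [if_neg hi]
      by_cases hia : i = a
      · subst hia
        rw [if_pos (List.mem_cons_self), PySem.Dict.getD_insert_self]
      · rw [if_neg (by simp [hia, hi]), PySem.Dict.getD_insert_of_ne]
        exact hia

theorem pvConnA_getD (words : List String) (groups : List Int) (i : Int)
    (h0 : 0 ≤ i) (hn : i < (words.length : Int)) :
    (pvConnA words groups).getD i []
      = (PySem.List.pyRange i (words.length : Int) 1).filter (pvPredA words groups i) := by
  unfold pvConnA
  rw [pv_getD_foldl_insert _ _ (PySem.List.nodup_pyRange_one 0 _) _ _ _,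
    if_pos (by rw [PySem.List.mem_pyRange_one]; exact ⟨h0, hn⟩),
    PySem.List.foldl_append_if_eq_filter]
  simp


-- ==== key/bucket layer ====
theorem pvKey_eq (w : List Char) (p : Int) (h : 0 ≤ p) :
    pvKey w p = (w.take p.toNat, w.drop (p.toNat + 1)) := by
  unfold pvKey
  rw [PySem.Chars.slice_eq_listSlice, PySem.Chars.slice_eq_listSlice,
    PySem.List.slice_to _ h, PySem.List.slice_from _ (by omega : (0:Int) ≤ p + 1)]
  congr 2
  omega

theorem pv_filter_unique (l : List Int) (pb : Int → Bool) (a : Int) (hl : l.Nodup)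
    (ha : a ∈ l) (h : ∀ x ∈ l, pb x = true ↔ x = a) : l.filter pb = [a] := by
  induction l with
  | nil => simp at ha
  | cons b l ih =>
    by_cases hba : b = a
    · subst hba
      rw [List.filter_cons, if_pos ((h b (List.mem_cons_self)).mpr rfl)]
      have : l.filter pb = [] := by
        rw [List.filter_eq_nil_iff]
        intro x hx hpx
        have := (h x (List.mem_cons_of_mem b hx)).mp hpx
        subst this
        exact (List.nodup_cons.mp hl).1 hx
      rw [this]
    · rw [List.filter_cons, if_neg (by
        intro hb
        exact hba ((h b (List.mem_cons_self)).mp hb))]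
      exact ih (List.Nodup.of_cons hl)
        (by
          rcases List.mem_cons.mp ha with h1 | h1
          · exact absurd h1.symm hba
          · exact h1)
        (fun x hx => h x (List.mem_cons_of_mem b hx))

theorem pv_flatMap_if (l : List Int) (pb : Int → Bool) :
    l.flatMap (fun x => if pb x then [x] else []) = l.filter pb := by
  induction l with
  | nil => rfl
  | cons b l ih =>
    rw [List.flatMap_cons, List.filter_cons, ih]
    by_cases hb : pb b <;> simp [hb]

theorem pv_filter_key (u : List Char) (c : List Char × List Char) :
    (PySem.List.pyRange 0 (u.length : Int) 1).filter (fun p => pvKey u p == c)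
      = if pvMatchB u c then [((c.1.length : Nat) : Int)] else [] := by
  have fact1 : ∀ p ∈ PySem.List.pyRange 0 (u.length : Int) 1,
      ((pvKey u p == c) = true ↔ (pvMatchB u c = true ∧ p = ((c.1.length : Nat) : Int))) := by
    intro p hp
    rw [PySem.List.mem_pyRange_one] at hp
    obtain ⟨h0, hL⟩ := hp
    rw [pvKey_eq u p h0, beq_iff_eq]
    have hpt : (p.toNat : Int) = p := by omega
    have hptL : p.toNat < u.length := by omega
    constructor
    · intro hc
      have hc1 : c.1 = u.take p.toNat := by rw [← hc]
      have hc2 : c.2 = u.drop (p.toNat + 1) := by rw [← hc]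
      have hlen : c.1.length = p.toNat := by
        rw [hc1, List.length_take]; omega
      constructor
      · unfold pvMatchB
        rw [hlen, hc1, hc2]
        simp [hptL]
      · omega
    · intro ⟨hm, hp⟩
      unfold pvMatchB at hm
      simp only [Bool.and_eq_true, beq_iff_eq, decide_eq_true_eq] at hm
      obtain ⟨⟨hlt, htake⟩, hdrop⟩ := hm
      have : p.toNat = c.1.length := by omega
      rw [this, Prod.ext_iff]
      exact ⟨htake, hdrop⟩
  by_cases hm : pvMatchB u c
  · rw [if_pos hm]
    apply pv_filter_unique _ _ _ (PySem.List.nodup_pyRange_one 0 _)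
    · rw [PySem.List.mem_pyRange_one]
      have : c.1.length < u.length := by
        unfold pvMatchB at hm
        simp only [Bool.and_eq_true, decide_eq_true_eq] at hm
        exact hm.1.1
      omega
    · intro x hx
      rw [fact1 x hx]
      simp [hm]
  · rw [if_neg hm, List.filter_eq_nil_iff]
    intro x hx hpx
    exact hm ((fact1 x hx).mp hpx).1

theorem pvPairs_eq (words : List String) :
    pvPairs words = (PySem.List.pyRange 0 (words.length : Int) 1).flatMap
      (fun j => (PySem.List.pyRange 0 ((pvW words j).length : Int) 1).map
        (fun p => (pvKey (pvW words j) p, j))) := by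
  unfold pvPairs
  rw [PySem.List.enumerate_eq_map_pyRange words "", List.flatMap_map]
  simp [pvW]

theorem pvIndex_getD (words : List String) (c : List Char × List Char) :
    (pvIndex words).getD c []
      = (PySem.List.pyRange 0 (words.length : Int) 1).filter
          (fun j => pvMatchB (pvW words j) c) := by
  unfold pvIndex
  rw [PySem.Dict.getD_foldl_modify_append, pvPairs_eq, List.filter_flatMap,
    List.map_flatMap]
  have hfun : ∀ j : Int,
      List.map (fun x => x.2)
        (List.filter (fun pr => pr.1 == c)
          (List.map (fun p => (pvKey (pvW words j) p, j))
            (PySem.List.pyRange 0 ((pvW words j).length : Int) 1)))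
      = if pvMatchB (pvW words j) c then [j] else [] := by
    intro j
    rw [List.filter_map, List.map_map]
    have : ((fun pr : (List Char × List Char) × Int => pr.1 == c) ∘
        (fun p => (pvKey (pvW words j) p, j))) = (fun p => pvKey (pvW words j) p == c) := rfl
    rw [this, pv_filter_key]
    by_cases hm : pvMatchB (pvW words j) c <;> simp [hm]
  simp only [hfun]
  rw [pv_flatMap_if]
  simp

-- getD of the empty dict


theorem pvW_def (words : List String) (i : Int) :
    (PySem.List.pyGetD words i "").toList = pvW words i := rfl

theorem pvPredA_iff (words : List String) (groups : List Int) (i j : Int) :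
    pvPredA words groups i j = true ↔
      (PySem.List.pyGetD groups i 0 ≠ PySem.List.pyGetD groups j 0) ∧
      (pvW words i).length = (pvW words j).length ∧
      pvMism (pvW words i) (pvW words j) = 1 := by
  unfold pvPredA
  rw [Bool.and_eq_true, decide_eq_true_eq, beq_iff_eq, pvW_def, pvW_def,
    pvHam_eq_one_iff]

theorem pvMatch_decomp (words : List String) (i p j : Int) (hp : 0 ≤ p)
    (hpL : p < ((pvW words i).length : Int))
    (hm : pvMatchB (pvW words j) (pvKey (pvW words i) p) = true) :
    p.toNat < (pvW words j).length ∧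
    (pvW words j).take p.toNat = (pvW words i).take p.toNat ∧
    (pvW words j).drop (p.toNat + 1) = (pvW words i).drop (p.toNat + 1) := by
  rw [pvKey_eq _ _ hp] at hm
  unfold pvMatchB at hm
  simp only [Bool.and_eq_true, beq_iff_eq, decide_eq_true_eq] at hm
  obtain ⟨⟨hlt, htake⟩, hdrop⟩ := hm
  have hlen : ((pvW words i).take p.toNat).length = p.toNat := by
    rw [List.length_take]; omega
  rw [hlen] at hlt htake hdrop
  exact ⟨hlt, htake, hdrop⟩

theorem pvMatch_build (words : List String) (i p j : Int) (hp : 0 ≤ p)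
    (hpL : p < ((pvW words i).length : Int))
    (hlen : (pvW words j).length = (pvW words i).length)
    (htake : (pvW words j).take p.toNat = (pvW words i).take p.toNat)
    (hdrop : (pvW words j).drop (p.toNat + 1) = (pvW words i).drop (p.toNat + 1)) :
    pvMatchB (pvW words j) (pvKey (pvW words i) p) = true := by
  rw [pvKey_eq _ _ hp]
  unfold pvMatchB
  simp only [Bool.and_eq_true, beq_iff_eq, decide_eq_true_eq]
  have hl : ((pvW words i).take p.toNat).length = p.toNat := by
    rw [List.length_take]; omega
  rw [hl]
  exact ⟨⟨by omega, htake⟩, hdrop⟩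

theorem pvConnList_mem (words : List String) (groups : List Int) (i j : Int)
    (hj : j ∈ pvConnList words groups i) :
    i < j ∧ j < (words.length : Int) ∧ pvPredA words groups i j = true := by
  unfold pvConnList at hj
  rw [List.mem_filter, PySem.List.mem_pyRange_one] at hj
  obtain ⟨⟨hij, hjn⟩, hpred⟩ := hj
  have hne : j ≠ i := by
    intro he
    subst he
    exact ((pvPredA_iff words groups j j).mp hpred).1 rfl
  exact ⟨by omega, hjn, hpred⟩

theorem pvNeigh_eq (words : List String) (groups : List Int) (i : Int)
    (h0 : 0 ≤ i) (_hn : i < (words.length : Int)) :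
    pvNeigh words groups (pvIndex words) i = pvConnList words groups i := by
  unfold pvNeigh
  rw [pvW_def]
  simp only [PySem.Chars.len_eq]
  have hstep : ∀ acc (p : Int),
      ((pvIndex words).getD (pvKey (pvW words i) p) []).foldl
        (fun acc j => if pvCondB words groups i p j then acc ++ [j] else acc) acc
      = acc ++ (PySem.List.pyRange 0 (words.length : Int) 1).filter
          (fun j => pvCondB words groups i p j &&
            pvMatchB (pvW words j) (pvKey (pvW words i) p)) := by
    intro acc p
    rw [PySem.List.foldl_append_if_eq_filter, pvIndex_getD, List.filter_filter]
  rw [PySem.List.foldl_congr_mem' _ _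
      (fun acc p => acc ++ (PySem.List.pyRange 0 (words.length : Int) 1).filter
          (fun j => pvCondB words groups i p j &&
            pvMatchB (pvW words j) (pvKey (pvW words i) p))) _
      (fun p _ acc => hstep acc p),
    PySem.List.foldl_append_eq_flatMap]
  rw [List.nil_append]
  -- raw = flatMap; now sorted raw = pvConnList
  apply PySem.List.sorted_eq_of_perm_of_pairwise_lt
  · -- Perm
    apply (List.perm_ext_iff_of_nodup ?_ ?_).mpr
    · -- membership
      intro j
      constructor
      · -- conn → raw
        intro hj
        obtain ⟨hij, hjn, hpred⟩ := pvConnList_mem words groups i j hj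
        obtain ⟨hg, hlen, hmis⟩ := (pvPredA_iff words groups i j).mp hpred
        obtain ⟨q, hq, htake, hdrop, hne⟩ :=
          pvMism_one_exists (pvW words i) (pvW words j) hlen hmis
        rw [List.mem_flatMap]
        refine ⟨(q : Int), ?_, ?_⟩
        · rw [PySem.List.mem_pyRange_one]; omega
        · rw [List.mem_filter, PySem.List.mem_pyRange_one, Bool.and_eq_true]
          have hq0 : (0:Int) ≤ (q:Int) := by omega
          have hqt : ((q:Int)).toNat = q := by omega
          refine ⟨⟨by omega, by omega⟩, ?_, ?_⟩
          case refine_2 =>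
            apply pvMatch_build words i (q:Int) j hq0 (by omega)
            · omega
            · rw [hqt]; exact htake.symm
            · rw [hqt]; exact hdrop.symm
          case refine_1 =>
            unfold pvCondB
            simp only [Bool.and_eq_true, decide_eq_true_eq]
            refine ⟨⟨hij, hg⟩, ?_⟩
            rw [pvW_def, pvW_def]
            rw [show ((q:Int)) = ((q:Nat):Int) from rfl,
              PySem.List.pyGet?_natCast, PySem.List.pyGet?_natCast]
            exact fun hc => hne (hc.symm)
      · -- raw → conn
        intro hj
        rw [List.mem_flatMap] at hj
        obtain ⟨p, hp, hjf⟩ := hj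
        rw [PySem.List.mem_pyRange_one] at hp
        rw [List.mem_filter, PySem.List.mem_pyRange_one, Bool.and_eq_true] at hjf
        obtain ⟨⟨hj0, hjn⟩, hcB, hmB⟩ := hjf
        obtain ⟨hplt, htake, hdrop⟩ := pvMatch_decomp words i p j hp.1 hp.2 hmB
        unfold pvCondB at hcB
        simp only [Bool.and_eq_true, decide_eq_true_eq] at hcB
        obtain ⟨⟨hij, hg⟩, hchar⟩ := hcB
        rw [pvW_def, pvW_def,
          show p = ((p.toNat : Nat) : Int) by omega,
          PySem.List.pyGet?_natCast, PySem.List.pyGet?_natCast] at hchar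
        have hpw : p.toNat < (pvW words i).length := by omega
        obtain ⟨hlen, hmis⟩ := pvMism_one_of (pvW words i) (pvW words j) p.toNat
          hpw hplt htake.symm hdrop.symm (fun hc => hchar hc.symm)
        unfold pvConnList
        rw [List.mem_filter, PySem.List.mem_pyRange_one]
        exact ⟨⟨by omega, hjn⟩, (pvPredA_iff words groups i j).mpr ⟨hg, hlen, hmis⟩⟩
    · -- nodup conn
      exact (PySem.List.nodup_pyRange_one i _).filter _
    · -- nodup raw
      rw [List.nodup_flatMap]
      constructor
      · intro p _
        exact (PySem.List.nodup_pyRange_one 0 _).filter _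
      · apply List.Pairwise.imp_of_mem ?_ (PySem.List.pairwise_lt_pyRange_one 0 _)
        intro p p' hpm hpm' hlt
        rw [PySem.List.mem_pyRange_one] at hpm hpm'
        intro j hjp hjp'
        rw [List.mem_filter, Bool.and_eq_true] at hjp hjp'
        obtain ⟨_, hcB, hmB⟩ := hjp
        obtain ⟨_, hcB', hmB'⟩ := hjp'
        obtain ⟨hplt, htake, hdrop⟩ := pvMatch_decomp words i p j hpm.1 hpm.2 hmB
        unfold pvCondB at hcB'
        simp only [Bool.and_eq_true, decide_eq_true_eq] at hcB'
        have hchar := hcB'.2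
        rw [pvW_def, pvW_def,
          show p' = ((p'.toNat : Nat) : Int) by omega,
          PySem.List.pyGet?_natCast, PySem.List.pyGet?_natCast] at hchar
        have heq := pv_eq_off (pvW words j) (pvW words i) p.toNat htake hdrop
          p'.toNat (by omega)
        exact hchar heq
  · -- pairwise <
    exact (PySem.List.pairwise_lt_pyRange_one i _).filter _

theorem pv_dp (words : List String) (groups : List Int) :
    ∀ (m : Nat), m ≤ words.length →
    ∀ (dA : PySem.Dict Int (List String)) (sB : List (List String)) (res : List String),
    sB = (PySem.List.pyRange (m : Int) (words.length : Int) 1).map (fun t => dA.getD t []) →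
    ((PySem.List.pyRange ((m : Int) - 1) (-1) (-1)).foldl
      (fun (st : PySem.Dict Int (List String) × List String) i =>
        let m0 := ((pvConnA words groups).getD i []).foldl
          (fun m c => if (st.1.getD c []).length > m.length then st.1.getD c [] else m) []
        let mi := PySem.List.pyGetD words i "" :: m0
        (st.1.insert i mi, if mi.length > st.2.length then mi else st.2))
      (dA, res)).2
    = ((PySem.List.pyRange ((m : Int) - 1) (-1) (-1)).foldl
      (fun (st : List (List String) × List String) i =>
        let tail := (pvNeigh words groups (pvIndex words) i).foldl
          (fun tl j =>
            let cand := PySem.List.pyGetD st.1 (j - i - 1) []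
            if cand.length > tl.length then cand else tl) []
        let best := PySem.List.pyGetD words i "" :: tail
        (best :: st.1, if best.length > st.2.length then best else st.2))
      (sB, res)).2 := by
  intro m
  induction m with
  | zero =>
    intro _ dA sB res _
    rw [show ((0:Nat):Int) - 1 = (-1:Int) by norm_num,
      PySem.List.pyRange_neg_one_eq_nil (by omega), List.foldl_nil, List.foldl_nil]
  | succ m ih =>
    intro hm dA sB res hs
    have hmn : (m:Int) < (words.length : Int) := by exact_mod_cast hm
    have hcons : PySem.List.pyRange (((m+1:Nat):Int) - 1) (-1) (-1)
        = ((m:Nat):Int) :: PySem.List.pyRange (((m:Nat):Int) - 1) (-1) (-1) := by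
      rw [show (((m+1:Nat):Int) - 1) = ((m:Nat):Int) by push_cast; ring,
        PySem.List.pyRange_neg_one_cons (by omega)]
    rw [hcons]
    simp only [List.foldl_cons]
    have htail :
        (pvNeigh words groups (pvIndex words) ((m:Nat):Int)).foldl
          (fun tl j =>
            if (PySem.List.pyGetD sB (j - (m:Nat) - 1) []).length > tl.length
            then PySem.List.pyGetD sB (j - (m:Nat) - 1) [] else tl) []
        = ((pvConnA words groups).getD ((m:Nat):Int) []).foldl
          (fun m0 c => if (dA.getD c []).length > m0.length then dA.getD c [] else m0) [] := by
      rw [pvNeigh_eq words groups _ (by omega) hmn,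
        pvConnA_getD words groups _ (by omega) hmn]
      apply PySem.List.foldl_congr_mem'
      intro j hj acc
      have hj' := pvConnList_mem words groups ((m:Nat):Int) j (by
        unfold pvConnList; exact hj)
      obtain ⟨hij, hjn, _⟩ := hj'
      have hk : j - (m:Nat) - 1 = (((j - (m:Nat) - 1).toNat : Nat) : Int) := by omega
      have hkb : (j - (m:Nat) - 1).toNat < ((words.length : Int) - ((m:Nat) + 1)).toNat := by
        omega
      rw [hs, hk,
        show ((m:Nat) + 1 : Int) = (((m+1:Nat)) : Int) by push_cast; ring] at *
      rw [PySem.List.pyGetD_map_pyRange_one (fun t => dA.getD t []) ((m+1:Nat):Int)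
        (words.length : Int) ((j - (m:Nat) - 1).toNat) [] (by push_cast at hkb ⊢; omega)]
      rw [show (((m+1:Nat)):Int) + ((j - (m:Nat) - 1).toNat : Int) = j by push_cast; omega]
    rw [htail]
    apply ih (by omega)
    -- invariant for the next step
    rw [PySem.List.pyRange_one_cons hmn, List.map_cons, PySem.Dict.getD_insert_self]
    congr 1
    rw [hs, show ((m:Nat):Int) + 1 = (((m+1:Nat)):Int) by push_cast; ring]
    apply List.map_congr_left
    intro t ht
    rw [PySem.List.mem_pyRange_one] at ht
    rw [PySem.Dict.getD_insert_of_ne]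
    intro he
    subst he
    push_cast at ht
    omega

theorem pv_main (words : List String) (groups : List Int) :
    getWordsInLongestSubsequence words groups = getWordsInLongestSubsequence_alt words groups := by
  unfold getWordsInLongestSubsequence getWordsInLongestSubsequence_alt
  exact pv_dp words groups words.length le_rfl PySem.Dict.empty [] [] (by
    rw [PySem.List.pyRange_one_eq_nil (le_refl _), List.map_nil])

-- ===== VERDICT (by name: the statement is the Claim_ definition above) =====
theorem getWordsInLongestSubsequence_spec : Claim_equal_getWordsInLongestSubsequence := by
  intro words groups _ _
  unfold Spec_getWordsInLongestSubsequence
  exact pv_main words groups
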